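-- pv_equiv track=rewrite | github.com/damarisarmoa12/Intro | parcialpython.py | filtrar_codigos_primos
-- ===== SOURCE A (Python) =====
-- def son_primos (s  : int) -> bool:
--     if s < 2:
--         return False
--     for i in range(2,s):
--         if s % i == 0:
--             return False
--     return True
--
-- def filtrar_codigos_primos(codigos_barra : list[int]) -> list[int]:
--    res = []
--    i = 0
--
--    while i < len(codigos_barra):
--       elemento = codigos_barra[i]
--       digito = elemento % 1000
--       if son_primos(digito):
--          res.append(elemento)
--       i += 1
--    return res
-- ===== SOURCE B (Python) =====
-- def filtrar_codigos_primos(codigos_barra: list[int]) -> list[int]: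
--     # sqrt-bounded trial division on the 3-digit residue, single filtering pass
--     def es_primo(n: int) -> bool:
--         if n < 2:
--             return False
--         i = 2
--         while i * i <= n:
--             if n % i == 0:
--                 return False
--             i += 1
--         return True
--     return [c for c in codigos_barra if es_primo(c % 1000)]
-- ===== Notes on version B (the rewrite author's own statement) =====
-- stated objective: faster
-- what changed: Replaces the while-index scan calling full trial division up to d-1 for each code's residue with a single filter pass using sqrt-bounded trial division (stop once i*i > d).
import Mathlib
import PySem

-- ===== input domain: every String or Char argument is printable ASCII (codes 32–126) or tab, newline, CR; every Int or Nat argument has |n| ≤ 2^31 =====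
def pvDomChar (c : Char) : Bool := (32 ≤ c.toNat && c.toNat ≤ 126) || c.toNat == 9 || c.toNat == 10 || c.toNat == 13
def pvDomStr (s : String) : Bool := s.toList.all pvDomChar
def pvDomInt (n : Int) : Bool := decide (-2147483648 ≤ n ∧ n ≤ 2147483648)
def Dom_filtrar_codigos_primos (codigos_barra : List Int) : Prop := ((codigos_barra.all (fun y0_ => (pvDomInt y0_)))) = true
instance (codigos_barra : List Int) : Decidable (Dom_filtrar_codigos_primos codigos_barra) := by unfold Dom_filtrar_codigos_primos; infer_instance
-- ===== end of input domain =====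

-- B replaces A's per-element full trial division (every i in [2, d)) with sqrt-bounded
-- trial division (stop once i*i > d) inside a single filter pass: a constant-factor speedup.

-- ===== PORT A =====
-- for i in range(2, s): if s % i == 0: return False   (early-return scan)
def son_primos_loop (s : Int) : List Int → Bool
  | [] => true
  | i :: rest => if PySem.Int.mod s i == 0 then false else son_primos_loop s rest

def son_primos (s : Int) : Bool :=
  if s < 2 then false else son_primos_loop s (PySem.List.pyRange 2 s 1)

def filtrar_codigos_primos (codigos_barra : List Int) : List Int :=
  -- while i < len(codigos_barra): index scan appending matching elements
  codigos_barra.foldl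
    (fun res elemento =>
      let digito := PySem.Int.mod elemento 1000
      if son_primos digito then res ++ [elemento] else res)
    []

-- ===== PORT B =====
-- while i * i <= n: if n % i == 0: return False; i += 1
def es_primo_loop (n : Int) (i : Int) : Bool :=
  if _h : i * i ≤ n then
    (if PySem.Int.mod n i == 0 then false else es_primo_loop n (i + 1))
  else true
termination_by (n + 2 - i).toNat
decreasing_by
  have hin : i ≤ n := by nlinarith [sq_nonneg i]
  omega

def es_primo (n : Int) : Bool :=
  if n < 2 then false else es_primo_loop n 2

def filtrar_codigos_primos_alt (codigos_barra : List Int) : List Int :=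
  codigos_barra.filter (fun c => es_primo (PySem.Int.mod c 1000))

-- ===== PRECONDITION & SPEC =====
def Spec_filtrar_codigos_primos (codigos_barra : List Int) (out : List Int) : Prop := out = filtrar_codigos_primos_alt codigos_barra
instance (codigos_barra : List Int) (out : List Int) : Decidable (Spec_filtrar_codigos_primos codigos_barra out) := by unfold Spec_filtrar_codigos_primos; infer_instance

-- ===== CLAIM (what is proved, stated in full; the proofs are below) =====
def Claim_equal_filtrar_codigos_primos : Prop := ∀ (codigos_barra : List Int), Dom_filtrar_codigos_primos codigos_barra → Spec_filtrar_codigos_primos codigos_barra (filtrar_codigos_primos codigos_barra)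

-- ===== LEMMAS AND PROOFS =====

-- A's loop is an 'all' over its list
theorem son_primos_loop_eq_all (s : Int) (l : List Int) :
    son_primos_loop s l = l.all (fun i => !(PySem.Int.mod s i == 0)) := by
  induction l with
  | nil => rfl
  | cons i rest ih =>
      simp only [son_primos_loop, List.all_cons]
      split_ifs with h <;> simp [h, ih]

-- characterization of A's primality test
theorem son_primos_iff (s : Int) :
    son_primos s = true ↔ 2 ≤ s ∧ ∀ i : Int, 2 ≤ i → i < s → ¬ i ∣ s := by
  unfold son_primos
  split_ifs with h
  · simp only [false_iff]
    intro ⟨h2, _⟩; omega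
  · rw [son_primos_loop_eq_all, List.all_eq_true]
    constructor
    · intro hall
      refine ⟨by omega, fun i h2 hlt hdvd => ?_⟩
      have hm := hall i (PySem.List.mem_pyRange_one.mpr ⟨h2, hlt⟩)
      rw [(PySem.Int.mod_eq_zero_iff_dvd s i).mpr hdvd] at hm
      simp at hm
    · rintro ⟨_, hno⟩ i hi
      obtain ⟨h2, hlt⟩ := PySem.List.mem_pyRange_one.mp hi
      have := hno i h2 hlt
      simp only [Bool.not_eq_eq_eq_not, Bool.not_true, beq_eq_false_iff_ne]
      intro hz
      exact this ((PySem.Int.mod_eq_zero_iff_dvd s i).mp hz)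

-- characterization of B's loop
theorem es_primo_loop_iff (n i : Int) (hi : 0 ≤ i) :
    es_primo_loop n i = true ↔ ∀ j : Int, i ≤ j → j * j ≤ n → ¬ j ∣ n := by
  revert hi
  induction i using es_primo_loop.induct n with
  | case1 i h hmod =>
      intro hi
      rw [es_primo_loop, dif_pos h, if_pos hmod]
      simp only [Bool.false_eq_true, false_iff]
      intro hall
      have hd : i ∣ n := (PySem.Int.mod_eq_zero_iff_dvd n i).mp (beq_iff_eq.mp hmod)
      exact hall i le_rfl h hd
  | case2 i h hmod ih =>
      intro hi
      rw [es_primo_loop, dif_pos h, if_neg hmod, ih (by omega)]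
      constructor
      · intro hrest j hij hjj hdvd
        rcases eq_or_lt_of_le hij with heq | hlt
        · exact absurd ((PySem.Int.mod_eq_zero_iff_dvd n i).mpr
            (by rw [heq]; exact hdvd)) (by simpa using hmod)
        · exact hrest j (by omega) hjj hdvd
      · intro hall j hij hjj hdvd
        exact hall j (by omega) hjj hdvd
  | case3 i h =>
      intro hi
      rw [es_primo_loop, dif_neg h]
      refine ⟨fun _ j hij hjj hdvd => ?_, fun _ => rfl⟩
      nlinarith

-- characterization of B's primality test
theorem es_primo_iff (n : Int) :
    es_primo n = true ↔ 2 ≤ n ∧ ∀ j : Int, 2 ≤ j → j * j ≤ n → ¬ j ∣ n := by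
  unfold es_primo
  split_ifs with h
  · simp only [false_iff]
    intro ⟨h2, _⟩; omega
  · rw [es_primo_loop_iff n 2 (by omega)]
    exact ⟨fun hall => ⟨by omega, hall⟩, fun ⟨_, hall⟩ => hall⟩

-- sqrt-bounded absence of divisors equals full-range absence of divisors
theorem pv_sqrt_bound (n : Int) (h2 : 2 ≤ n) :
    (∀ i : Int, 2 ≤ i → i < n → ¬ i ∣ n) ↔ (∀ j : Int, 2 ≤ j → j * j ≤ n → ¬ j ∣ n) := by
  constructor
  · intro hall j hj hjj hdvd
    exact hall j hj (by nlinarith) hdvd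
  · intro hall i hi hlt hdvd
    have hdvd' := hdvd
    obtain ⟨k, hk⟩ := hdvd'
    have hkpos : 0 < k := by nlinarith
    have hk2 : 2 ≤ k := by
      rcases (by omega : k = 1 ∨ 2 ≤ k) with rfl | h
      · omega
      · exact h
    by_cases hii : i * i ≤ n
    · exact hall i hi hii hdvd
    · have hki : k < i := by nlinarith
      exact hall k hk2 (by nlinarith) ⟨i, by linarith [hk, mul_comm i k]⟩


-- the two primality tests agree everywhere
theorem son_primos_eq_es_primo (d : Int) : son_primos d = es_primo d := by
  by_cases h2 : 2 ≤ d
  · rcases hb : es_primo d with _ | _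
    · rcases ha : son_primos d with _ | _
      · rfl
      · exfalso
        have := (son_primos_iff d).mp ha
        rw [(pv_sqrt_bound d h2) ] at this
        · exact absurd ((es_primo_iff d).mpr ⟨h2, this.2⟩) (by simp [hb])
    · have := (es_primo_iff d).mp hb
      exact (son_primos_iff d).mpr ⟨h2, ((pv_sqrt_bound d h2).mpr this.2)⟩
  · unfold son_primos es_primo
    rw [if_pos (by omega), if_pos (by omega)]

-- ===== VERDICT (by name: the statement is the Claim_ definition above) =====
theorem filtrar_codigos_primos_spec : Claim_equal_filtrar_codigos_primos := by
  intro codigos _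
  unfold Spec_filtrar_codigos_primos filtrar_codigos_primos filtrar_codigos_primos_alt
  rw [PySem.List.foldl_append_if_eq_filter]
  simp only [List.nil_append]
  congr 1
  funext c
  exact son_primos_eq_es_primo (PySem.Int.mod c 1000)
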